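-- pv_equiv track=rewrite | github.com/tridentbio/mariner | app/app/features/model/utils.py | get_inputs_from_mask_ltr
-- ===== SOURCE A (Python) =====
-- def get_inputs_from_mask_ltr(arr, mask):
--     """
--     >>> get_inputs_from_mask_ltr(['a', 'b', 'c'], 0b011)
--     >>> ['b', 'c']
--     """
--     bit_idx = 0b1
--     result = []
--     for idx, el in enumerate(arr[::-1]):
--         position = 1 << idx
--         if position & mask != 0:
--             result.append(el)
--         bit_idx = bit_idx << 1
--     return result[::-1]
-- ===== SOURCE B (Python) =====
-- def get_inputs_from_mask_ltr(arr, mask):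
--     # Build the n low mask bits as a binary digit string aligned msb-first with arr,
--     # then select by zipping -- one forward pass, no reversals.
--     n = len(arr)
--     bits = format(mask & ((1 << n) - 1), '0{}b'.format(n))
--     return [el for el, b in zip(arr, bits) if b == '1']
-- ===== Notes on version B (the rewrite author's own statement) =====
-- stated objective: faster
-- what changed: Instead of reversing the list, computing a fresh 1<<idx big integer per element and reversing the result again, B formats the n low mask bits once as a fixed-width binary string and selects elements by zipping it with the list in one forward pass; this avoids the per-element O(idx)-bit shift-and-test that makes A quadratic in bit operations.
import Mathlib
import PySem

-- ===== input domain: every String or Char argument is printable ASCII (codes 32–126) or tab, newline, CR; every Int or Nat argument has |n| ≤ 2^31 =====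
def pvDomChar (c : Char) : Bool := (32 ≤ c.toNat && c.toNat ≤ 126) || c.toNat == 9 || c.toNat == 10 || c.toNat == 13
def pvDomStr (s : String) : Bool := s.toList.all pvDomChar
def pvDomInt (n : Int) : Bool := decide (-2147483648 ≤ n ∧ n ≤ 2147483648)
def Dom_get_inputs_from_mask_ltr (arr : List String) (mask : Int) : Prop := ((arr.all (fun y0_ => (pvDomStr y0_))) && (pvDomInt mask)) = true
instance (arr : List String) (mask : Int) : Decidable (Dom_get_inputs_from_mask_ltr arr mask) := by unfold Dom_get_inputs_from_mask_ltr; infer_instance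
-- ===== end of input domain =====

-- B replaces A's reverse / per-element shift-test / reverse with one binary digit table zipped forward.

-- ===== PORT A =====
-- A's local `bit_idx` is written on every iteration but never read, so it is not carried in the fold state.
def get_inputs_from_mask_ltr (arr : List String) (mask : Int) : List String :=
  let rev := (PySem.List.slice? arr none none (-1)).getD []          -- arr[::-1]
  let result := (PySem.List.enumerate rev).foldl
    (fun result p =>
      let position := (1 : Int) <<< p.1                              -- 1 << idx
      if Int.land position mask ≠ 0 then result ++ [p.2] else result) -- position & mask != 0
    []
  (PySem.List.slice? result none none (-1)).getD []                  -- result[::-1]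

-- ===== PORT B =====
-- Port of format(m, '0{n}b') restricted to m < 2^n (guaranteed by the masking in the caller):
-- the n binary digits of m, most significant first.  (For n = 0 Python's format yields '0',
-- but zip with the empty list discards it; the port returns the empty digit list directly.)
def pyFormatBin : Nat → Nat → List Char
  | 0, _ => []
  | w + 1, m => (if m.testBit w then '1' else '0') :: pyFormatBin w m

def get_inputs_from_mask_ltr_alt (arr : List String) (mask : Int) : List String :=
  let n := arr.length
  let bits := pyFormatBin n ((Int.land mask ((1 <<< (n : Int)) - 1)).toNat)  -- mask & ((1<<n)-1)
  ((arr.zip bits).filter (fun p => p.2 == '1')).map (fun p => p.1)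

-- ===== PRECONDITION & SPEC =====
def Spec_get_inputs_from_mask_ltr (arr : List String) (mask : Int) (out : List String) : Prop := out = get_inputs_from_mask_ltr_alt arr mask
instance (arr : List String) (mask : Int) (out : List String) : Decidable (Spec_get_inputs_from_mask_ltr arr mask out) := by unfold Spec_get_inputs_from_mask_ltr; infer_instance

-- ===== CLAIM (what is proved, stated in full; the proofs are below) =====
def Claim_equal_get_inputs_from_mask_ltr : Prop := ∀ (arr : List String) (mask : Int), Dom_get_inputs_from_mask_ltr arr mask → Spec_get_inputs_from_mask_ltr arr mask (get_inputs_from_mask_ltr arr mask)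

-- ===== LEMMAS AND PROOFS =====

-- a Nat all of whose bits have the shape `j = k ∧ b` is nonzero iff b
theorem pv_aux_ne_zero (x k : Nat) (b : Bool)
    (h : ∀ j, x.testBit j = (decide (j = k) && b)) : x ≠ 0 ↔ b = true := by
  cases b with
  | false =>
    have hx : x = 0 := Nat.eq_of_testBit_eq (fun i => by simp [h i, Nat.zero_testBit])
    simp [hx]
  | true =>
    have hx : x = 2 ^ k := Nat.eq_of_testBit_eq (fun i => by
      simp [h i, Nat.testBit_two_pow, eq_comm])
    simp [hx]

-- Python's `(1 << k) & mask != 0` is bit k of mask (two's complement, any sign)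
theorem pv_condA (mask : Int) (k : Nat) :
    (Int.land ((1 : Int) <<< (k : Int)) mask ≠ 0) ↔ mask.testBit k = true := by
  rw [Int.one_shiftLeft]
  cases mask with
  | ofNat a =>
    have : Int.land ((2 ^ k : Nat) : Int) (Int.ofNat a) = Int.ofNat ((2 ^ k) &&& a) := by
      simp [Int.land]
    rw [this]
    have hne : Int.ofNat ((2 ^ k) &&& a) ≠ 0 ↔ ((2 ^ k) &&& a) ≠ 0 := by
      simp
    rw [hne]
    have := pv_aux_ne_zero ((2 ^ k) &&& a) k (a.testBit k) (fun j => by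
      by_cases hj : j = k
      · subst hj; simp [Nat.testBit_and]
      · simp [Nat.testBit_and, hj, Ne.symm hj])
    rw [this]; simp [Int.testBit]
  | negSucc a =>
    have : Int.land ((2 ^ k : Nat) : Int) (Int.negSucc a) = Int.ofNat ((2 ^ k).ldiff a) := by
      simp [Int.land]
    rw [this]
    have hne : Int.ofNat ((2 ^ k).ldiff a) ≠ 0 ↔ ((2 ^ k).ldiff a) ≠ 0 := by
      simp
    rw [hne]
    have := pv_aux_ne_zero ((2 ^ k).ldiff a) k (!a.testBit k) (fun j => by
      by_cases hj : j = k
      · subst hj; simp [Nat.testBit_ldiff]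
      · simp [Nat.testBit_ldiff, hj, Ne.symm hj])
    rw [this]; simp [Int.testBit]

-- the bits of `mask & ((1 << n) - 1)` below n are the bits of mask
theorem pv_maskedBits (mask : Int) (n k : Nat) (hk : k < n) :
    ((Int.land mask ((1 <<< (n : Int)) - 1)).toNat).testBit k = mask.testBit k := by
  rw [Int.one_shiftLeft]
  have hcast : ((2 ^ n : Nat) : Int) - 1 = ((2 ^ n - 1 : Nat) : Int) := by
    have : 1 ≤ 2 ^ n := Nat.one_le_two_pow
    omega
  rw [hcast]
  cases mask with
  | ofNat a =>
    have : Int.land (Int.ofNat a) ((2 ^ n - 1 : Nat) : Int) = Int.ofNat (a &&& (2 ^ n - 1)) := by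
      simp [Int.land]
    rw [this]
    simp [Int.toNat, hk, Int.testBit]
  | negSucc a =>
    have : Int.land (Int.negSucc a) ((2 ^ n - 1 : Nat) : Int) = Int.ofNat ((2 ^ n - 1).ldiff a) := by
      simp [Int.land]
    rw [this]
    simp [Int.toNat, Nat.testBit_ldiff, Nat.testBit_two_pow_sub_one, hk, Int.testBit]

theorem pv_formatBin_congr (w : Nat) (m m' : Nat)
    (h : ∀ j, j < w → m.testBit j = m'.testBit j) : pyFormatBin w m = pyFormatBin w m' := by
  induction w with
  | zero => rfl
  | succ w ih =>
    simp only [pyFormatBin]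
    rw [h w (Nat.lt_succ_self w), ih (fun j hj => h j (Nat.lt_succ_of_lt hj))]

-- B on a cons peels off exactly the bit xs.length of the mask
theorem pv_B_cons (x : String) (xs : List String) (mask : Int) :
    get_inputs_from_mask_ltr_alt (x :: xs) mask
      = (if mask.testBit xs.length then [x] else []) ++ get_inputs_from_mask_ltr_alt xs mask := by
  simp only [get_inputs_from_mask_ltr_alt, List.length_cons]
  set n := xs.length
  set m := (Int.land mask ((1 <<< ((n + 1 : Nat) : Int)) - 1)).toNat with hm
  set m' := (Int.land mask ((1 <<< ((n : Nat) : Int)) - 1)).toNat with hm'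
  have htail : pyFormatBin n m = pyFormatBin n m' :=
    pv_formatBin_congr n m m' (fun j hj => by
      rw [pv_maskedBits mask (n + 1) j (Nat.lt_succ_of_lt hj), pv_maskedBits mask n j hj])
  have hhead : m.testBit n = mask.testBit n := pv_maskedBits mask (n + 1) n (Nat.lt_succ_self n)
  simp only [pyFormatBin, List.zip_cons_cons, List.filter_cons, htail, hhead]
  cases h : mask.testBit n <;> simp

-- A on a cons peels off the same bit (the new element sits last in the reversed list)
theorem pv_A_cons (x : String) (xs : List String) (mask : Int) :
    get_inputs_from_mask_ltr (x :: xs) mask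
      = (if mask.testBit xs.length then [x] else []) ++ get_inputs_from_mask_ltr xs mask := by
  simp only [get_inputs_from_mask_ltr, PySem.List.slice?_none_none_neg_one, Option.getD_some,
    List.reverse_cons]
  rw [PySem.List.enumerate_append, List.foldl_append]
  simp only [PySem.List.enumerate_cons, PySem.List.enumerate_nil, List.foldl_cons, List.foldl_nil,
    List.length_reverse, zero_add]
  by_cases h : Int.land ((1 : Int) <<< (xs.length : Int)) mask ≠ 0
  · have hb : mask.testBit xs.length = true := (pv_condA mask xs.length).mp h
    simp [h, hb]
  · have hb : mask.testBit xs.length = false := by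
      rcases Bool.eq_false_or_eq_true (mask.testBit xs.length) with ht | hf
      · exact absurd ((pv_condA mask xs.length).mpr ht) h
      · exact hf
    simp [h, hb]

theorem pv_main (arr : List String) (mask : Int) :
    get_inputs_from_mask_ltr arr mask = get_inputs_from_mask_ltr_alt arr mask := by
  induction arr with
  | nil => rfl
  | cons x xs ih => rw [pv_A_cons, pv_B_cons, ih]

-- ===== VERDICT (by name: the statement is the Claim_ definition above) =====
theorem get_inputs_from_mask_ltr_spec : Claim_equal_get_inputs_from_mask_ltr := by
  intro arr mask _
  exact pv_main arr mask
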